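-- pv_equiv track=rewrite | github.com/noi-ph/abakoda | long-contest-sample-code/G/solution-forward-backward.py | get_answer_array
-- ===== SOURCE A (Python) =====
-- INF = 10**9
--
-- def go_one_direction(n, s, c, order):
--     curr = INF
--     nearest = [None for i in range(n)]
--     for i in order:
--         if s[i] == c:
--             curr = 0
--         elif s[i] == '.':
--             curr += 1
--         else:
--             curr = INF
--
--         nearest[i] = curr
--
--     return nearest
--
-- def get_answer_array(n, s, c):
--     return [
--         x if x < INF else -1
--         for x in (
--             min(forward, backward)
--             for forward, backward in zip(
--                 go_one_direction(n, s, c, range(n)),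
--                 go_one_direction(n, s, c, range(n-1, -1, -1))
--             )
--         )
--     ]
-- ===== SOURCE B (Python) =====
-- INF = 10**9
--
-- def _walk_left(s, c, i):
--     d = 0
--     j = i
--     while j >= 0:
--         if s[j] == c:
--             return d
--         if s[j] != '.':
--             return INF
--         j -= 1
--         d += 1
--     return INF
--
-- def _walk_right(n, s, c, i):
--     d = 0
--     j = i
--     while j < n:
--         if s[j] == c:
--             return d
--         if s[j] != '.':
--             return INF
--         j += 1
--         d += 1
--     return INF
--
-- def get_answer_array(n, s, c):
--     out = []
--     for i in range(n):
--         best = min(_walk_left(s, c, i), _walk_right(n, s, c, i))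
--         out.append(best if best < INF else -1)
--     return out
-- ===== Notes on version B (the rewrite author's own statement) =====
-- stated objective: alternative
-- what changed: Replaces the two global directional sweeps (running-counter DP filling forward/backward arrays, then zip/min/clamp) by a direct per-position search: for each index, walk left and walk right until a matching char or a barrier, and take the smaller walk length.
import Mathlib
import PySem

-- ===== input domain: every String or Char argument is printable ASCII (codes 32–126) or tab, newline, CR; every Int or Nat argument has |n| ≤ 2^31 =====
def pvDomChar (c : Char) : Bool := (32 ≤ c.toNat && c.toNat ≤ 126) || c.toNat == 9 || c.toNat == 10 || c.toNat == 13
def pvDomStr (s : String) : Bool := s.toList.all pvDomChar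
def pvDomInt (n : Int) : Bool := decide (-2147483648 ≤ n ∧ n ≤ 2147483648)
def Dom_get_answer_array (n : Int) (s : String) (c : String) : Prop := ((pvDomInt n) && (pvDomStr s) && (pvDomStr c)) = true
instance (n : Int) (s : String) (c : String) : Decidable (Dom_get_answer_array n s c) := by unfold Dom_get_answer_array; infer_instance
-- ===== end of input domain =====

-- B replaces A's two directional running-counter sweeps by an independent left/right walk from each
-- position (objective: alternative — a genuinely different algorithm of similar size, not faster).

def pvINF : Int := 10 ^ 9

-- ===== PORT A =====
-- loop body of go_one_direction: compute curr from s[i], store it at nearest[i]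
def goBody (s c : String) (st : Int × List (Option Int)) (i : Int) : Int × List (Option Int) :=
  let curr : Int :=
    match PySem.Str.pyGet? s i with
    | some ch =>
        if [ch] = c.toList then 0
        else if ch = '.' then st.1 + 1
        else pvINF
    | none => st.1   -- IndexError in Python; excluded by Pre_
  (curr, st.2.set i.toNat (some curr))

def go_one_direction (n : Int) (s : String) (c : String) (order : List Int) : List (Option Int) :=
  (order.foldl (goBody s c) (pvINF, List.replicate n.toNat (none : Option Int))).2

def get_answer_array (n : Int) (s : String) (c : String) : List Int :=
  ((go_one_direction n s c (PySem.List.pyRange 0 n 1)).zip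
     (go_one_direction n s c (PySem.List.pyRange (n - 1) (-1) (-1)))).map
    (fun fb =>
      let m : Int :=
        match fb with
        | (some a, some b) => min a b
        | (some a, none) => a      -- unreachable: both lists are fully populated
        | (none, some b) => b
        | (none, none) => 0
      if m < pvINF then m else -1)

-- ===== PORT B =====
def walkL (cs cl : List Char) (j d : Int) : Int :=
  if h : 0 ≤ j then
    match cs[j.toNat]? with
    | some ch =>
        if [ch] = cl then d
        else if ch ≠ '.' then pvINF
        else walkL cs cl (j - 1) (d + 1)
    | none => pvINF   -- index past the end; unreachable under Pre_
  else pvINF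
termination_by (j + 1).toNat
decreasing_by omega

def walkR (n : Int) (cs cl : List Char) (j d : Int) : Int :=
  if h : j < n then
    match cs[j.toNat]? with
    | some ch =>
        if [ch] = cl then d
        else if ch ≠ '.' then pvINF
        else walkR n cs cl (j + 1) (d + 1)
    | none => pvINF   -- index past the end; unreachable under Pre_
  else pvINF
termination_by (n - j).toNat
decreasing_by omega

def get_answer_array_alt (n : Int) (s : String) (c : String) : List Int :=
  (PySem.List.pyRange 0 n 1).foldl
    (fun out i =>
      let best := min (walkL s.toList c.toList i 0) (walkR n s.toList c.toList i 0)
      out ++ [if best < pvINF then best else -1])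
    []

-- ===== PRECONDITION & SPEC =====
-- Pre_ excludes exactly the inputs on which A raises IndexError: n larger than len(s).
def Pre_get_answer_array (n : Int) (s : String) (c : String) : Prop :=
  n ≤ (s.toList.length : Int)

instance (n : Int) (s : String) (c : String) : Decidable (Pre_get_answer_array n s c) := by
  unfold Pre_get_answer_array; infer_instance

def pvWitness_get_answer_array : Int × String × String := (3, "a.b", "b")

def Spec_get_answer_array (n : Int) (s : String) (c : String) (out : List Int) : Prop :=
  out = get_answer_array_alt n s c

instance (n : Int) (s : String) (c : String) (out : List Int) :
    Decidable (Spec_get_answer_array n s c out) := by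
  unfold Spec_get_answer_array; infer_instance

-- ===== CLAIM (what is proved, stated in full; the proofs are below) =====
def Claim_equal_get_answer_array : Prop :=
  ∀ (n : Int) (s : String) (c : String), Dom_get_answer_array n s c →
    Pre_get_answer_array n s c → Spec_get_answer_array n s c (get_answer_array n s c)

-- ===== LEMMAS AND PROOFS =====

-- value written by A's scan at one cell, given the previous running counter
def pvStep (prev : Int) (t cl : List Char) (k : Nat) : Int :=
  match t[k]? with
  | some ch => if [ch] = cl then 0 else if ch = '.' then prev + 1 else pvINF
  | none => prev

-- forward-scan values: pvF k = value A's forward pass stores at index k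
def pvF (t cl : List Char) : Nat → Int
  | 0 => pvStep pvINF t cl 0
  | k + 1 => pvStep (pvF t cl k) t cl (k + 1)

-- backward-scan values, indexed by offset m from the right end (index N-1-m)
def pvG (t cl : List Char) (N : Nat) : Nat → Int
  | 0 => pvStep pvINF t cl (N - 1)
  | m + 1 => pvStep (pvG t cl N m) t cl (N - 1 - (m + 1))

-- a matching char is reachable from index k going left through '.' cells
def pvRchF (t cl : List Char) : Nat → Bool
  | 0 => match t[0]? with
         | some ch => decide ([ch] = cl)
         | none => false
  | k + 1 => match t[k + 1]? with
         | some ch => decide ([ch] = cl) || (decide (ch = '.') && pvRchF t cl k)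
         | none => false

-- reachable going right; m is the offset from the right end (index N-1-m)
def pvRchR (t cl : List Char) (N : Nat) : Nat → Bool
  | 0 => match t[N - 1]? with
         | some ch => decide ([ch] = cl)
         | none => false
  | m + 1 => match t[N - 1 - (m + 1)]? with
         | some ch => decide ([ch] = cl) || (decide (ch = '.') && pvRchR t cl N m)
         | none => false

theorem pvStep_some (prev : Int) (t cl : List Char) (k : Nat) (hk : k < t.length) :
    pvStep prev t cl k =
      if [t[k]] = cl then 0 else if t[k] = '.' then prev + 1 else pvINF := by
  rw [pvStep]
  simp [List.getElem?_eq_getElem hk]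

theorem walkL_step (t cl : List Char) (k : Nat) (hk : k < t.length) (d : Int) :
    walkL t cl (k : Int) d =
      if [t[k]] = cl then d
      else if t[k] ≠ '.' then pvINF
      else walkL t cl ((k : Int) - 1) (d + 1) := by
  rw [walkL]
  rw [dif_pos (by omega : (0:Int) ≤ (k:Int))]
  simp [List.getElem?_eq_getElem hk]

theorem walkL_neg (t cl : List Char) (j d : Int) (hj : j < 0) :
    walkL t cl j d = pvINF := by
  rw [walkL, dif_neg (by omega)]

theorem walkR_step (n : Int) (t cl : List Char) (k : Nat) (hk : k < t.length)
    (hn : (k : Int) < n) (d : Int) :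
    walkR n t cl (k : Int) d =
      if [t[k]] = cl then d
      else if t[k] ≠ '.' then pvINF
      else walkR n t cl ((k : Int) + 1) (d + 1) := by
  rw [walkR, dif_pos hn]
  simp [List.getElem?_eq_getElem hk]

theorem walkR_oob (n : Int) (t cl : List Char) (j d : Int) (hj : n ≤ j) :
    walkR n t cl j d = pvINF := by
  rw [walkR, dif_neg (by omega)]

theorem pvRchF_zero (t cl : List Char) (h : 0 < t.length) :
    pvRchF t cl 0 = decide ([t[0]] = cl) := by
  rw [pvRchF]
  simp [List.getElem?_eq_getElem h]

theorem pvRchF_succ (t cl : List Char) (k : Nat) (h : k + 1 < t.length) :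
    pvRchF t cl (k + 1)
    = (decide ([t[k+1]] = cl) || (decide (t[k+1] = '.') && pvRchF t cl k)) := by
  rw [pvRchF]
  simp [List.getElem?_eq_getElem h]

theorem pvRchR_zero (t cl : List Char) (N : Nat) (h : N - 1 < t.length) :
    pvRchR t cl N 0 = decide ([t[N-1]] = cl) := by
  rw [pvRchR]
  simp [List.getElem?_eq_getElem h]

theorem pvRchR_succ (t cl : List Char) (N m : Nat) (h : N - 1 - (m+1) < t.length) :
    pvRchR t cl N (m + 1)
    = (decide ([t[N-1-(m+1)]] = cl) || (decide (t[N-1-(m+1)] = '.') && pvRchR t cl N m)) := by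
  rw [pvRchR]
  simp [List.getElem?_eq_getElem h]

theorem walkL_spec (t cl : List Char) (k : Nat) (hk : k < t.length) :
    if pvRchF t cl k then (0 ≤ pvF t cl k ∧ ∀ d, walkL t cl (k : Int) d = d + pvF t cl k)
    else (pvINF ≤ pvF t cl k ∧ ∀ d, walkL t cl (k : Int) d = pvINF) := by
  induction k with
  | zero =>
    rw [pvRchF_zero t cl hk, pvF, pvStep_some _ _ _ _ hk]
    by_cases hc : [t[0]] = cl
    · rw [if_pos hc, if_pos (by simp [hc])]
      exact ⟨le_refl 0, fun d => by rw [walkL_step t cl 0 hk, if_pos hc]; ring⟩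
    · rw [if_neg hc, if_neg (by simp [hc])]
      by_cases hd : t[0] = '.'
      · rw [if_pos hd]
        refine ⟨by simp [pvINF], fun d => ?_⟩
        rw [walkL_step t cl 0 hk, if_neg hc, if_neg (by simp [hd])]
        exact walkL_neg _ _ _ _ (by norm_num)
      · rw [if_neg hd]
        refine ⟨le_refl _, fun d => ?_⟩
        rw [walkL_step t cl 0 hk, if_neg hc, if_pos hd]
  | succ k ih =>
    have hk' : k < t.length := by omega
    have ih := ih hk'
    have hcast : ((k + 1 : Nat) : Int) = (k : Int) + 1 := by push_cast; ring
    have hsub : (k : Int) + 1 - 1 = (k : Int) := by ring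
    rw [pvRchF_succ t cl k hk, pvF, pvStep_some _ _ _ _ hk]
    by_cases hc : [t[k+1]] = cl
    · rw [if_pos hc, if_pos (by simp [hc])]
      exact ⟨le_refl 0, fun d => by
        rw [walkL_step t cl (k+1) hk, if_pos hc]; ring⟩
    · have h1 : decide ([t[k+1]] = cl) = false := by simp [hc]
      rw [if_neg hc, h1, Bool.false_or]
      by_cases hd : t[k+1] = '.'
      · have h2 : decide (t[k+1] = '.') = true := by simp [hd]
        rw [if_pos hd, h2, Bool.true_and]
        by_cases hr : pvRchF t cl k
        · rw [if_pos hr] at ih ⊢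
          obtain ⟨hnn, hw⟩ := ih
          refine ⟨by omega, fun d => ?_⟩
          rw [walkL_step t cl (k+1) hk, if_neg hc, if_neg (by simp [hd]), hcast, hsub, hw]
          ring
        · rw [if_neg hr] at ih ⊢
          obtain ⟨hnn, hw⟩ := ih
          refine ⟨by omega, fun d => ?_⟩
          rw [walkL_step t cl (k+1) hk, if_neg hc, if_neg (by simp [hd]), hcast, hsub, hw]
      · have h2 : decide (t[k+1] = '.') = false := by simp [hd]
        rw [if_neg hd, h2, Bool.false_and, if_neg (by simp)]
        refine ⟨le_refl _, fun d => ?_⟩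
        rw [walkL_step t cl (k+1) hk, if_neg hc, if_pos hd]

theorem walkR_spec (t cl : List Char) (N : Nat) (hN : N ≤ t.length) (m : Nat) (hm : m < N) :
    if pvRchR t cl N m then
      (0 ≤ pvG t cl N m ∧ ∀ d, walkR (N : Int) t cl ((N - 1 - m : Nat) : Int) d = d + pvG t cl N m)
    else (pvINF ≤ pvG t cl N m ∧ ∀ d, walkR (N : Int) t cl ((N - 1 - m : Nat) : Int) d = pvINF) := by
  induction m with
  | zero =>
    have hlt : N - 1 < t.length := by omega
    have hn : ((N - 1 : Nat) : Int) < (N : Int) := by omega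
    simp only [Nat.sub_zero]
    rw [pvRchR_zero t cl N hlt, pvG, pvStep_some _ _ _ _ hlt]
    by_cases hc : [t[N-1]] = cl
    · rw [if_pos hc, if_pos (by simp [hc])]
      exact ⟨le_refl 0, fun d => by rw [walkR_step _ t cl (N-1) hlt hn, if_pos hc]; ring⟩
    · have h1 : decide ([t[N-1]] = cl) = false := by simp [hc]
      rw [if_neg hc, h1, if_neg (by simp)]
      by_cases hd : t[N-1] = '.'
      · rw [if_pos hd]
        refine ⟨by simp [pvINF], fun d => ?_⟩
        rw [walkR_step _ t cl (N-1) hlt hn, if_neg hc, if_neg (by simp [hd])]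
        exact walkR_oob _ _ _ _ _ (by omega)
      · rw [if_neg hd]
        refine ⟨le_refl _, fun d => ?_⟩
        rw [walkR_step _ t cl (N-1) hlt hn, if_neg hc, if_pos hd]
  | succ m ih =>
    have ih := ih (by omega)
    have hlt : N - 1 - (m+1) < t.length := by omega
    have hn : ((N - 1 - (m+1) : Nat) : Int) < (N : Int) := by omega
    have hcast : ((N - 1 - (m+1) : Nat) : Int) + 1 = ((N - 1 - m : Nat) : Int) := by omega
    rw [pvRchR_succ t cl N m hlt, pvG, pvStep_some _ _ _ _ hlt]
    by_cases hc : [t[N-1-(m+1)]] = cl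
    · rw [if_pos hc, if_pos (by simp [hc])]
      exact ⟨le_refl 0, fun d => by
        rw [walkR_step _ t cl (N-1-(m+1)) hlt hn, if_pos hc]; ring⟩
    · have h1 : decide ([t[N-1-(m+1)]] = cl) = false := by simp [hc]
      rw [if_neg hc, h1, Bool.false_or]
      by_cases hd : t[N-1-(m+1)] = '.'
      · have h2 : decide (t[N-1-(m+1)] = '.') = true := by simp [hd]
        rw [if_pos hd, h2, Bool.true_and]
        by_cases hr : pvRchR t cl N m
        · rw [if_pos hr] at ih ⊢
          obtain ⟨hnn, hw⟩ := ih
          refine ⟨by omega, fun d => ?_⟩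
          rw [walkR_step _ t cl (N-1-(m+1)) hlt hn, if_neg hc, if_neg (by simp [hd]),
            hcast, hw]
          ring
        · rw [if_neg hr] at ih ⊢
          obtain ⟨hnn, hw⟩ := ih
          refine ⟨by omega, fun d => ?_⟩
          rw [walkR_step _ t cl (N-1-(m+1)) hlt hn, if_neg hc, if_neg (by simp [hd]),
            hcast, hw]
      · have h2 : decide (t[N-1-(m+1)] = '.') = false := by simp [hd]
        rw [if_neg hd, h2, Bool.false_and, if_neg (by simp)]
        refine ⟨le_refl _, fun d => ?_⟩
        rw [walkR_step _ t cl (N-1-(m+1)) hlt hn, if_neg hc, if_pos hd]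

theorem pv_set_range (N m : Nat) (F : Nat → Int) (hm : m < N) :
    ((List.range N).map (fun k => if k < m then some (F k) else none)).set m (some (F m))
    = (List.range N).map (fun k => if k < m + 1 then some (F k) else none) := by
  apply List.ext_getElem
  · simp
  · intro i h1 h2
    simp only [List.getElem_set, List.getElem_map, List.getElem_range] at *
    split_ifs <;> simp_all <;> omega

theorem pv_set_range' (N m : Nat) (F : Nat → Int) (hm : m < N) :
    ((List.range N).map (fun k => if N - m ≤ k then some (F k) else none)).set (N - 1 - m)
      (some (F (N - 1 - m)))
    = (List.range N).map (fun k => if N - (m + 1) ≤ k then some (F k) else none) := by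
  apply List.ext_getElem
  · simp
  · intro i h1 h2
    simp only [List.getElem_set, List.getElem_map, List.getElem_range] at *
    split_ifs <;> simp_all <;> omega

theorem goBody_eq (s c : String) (st : Int × List (Option Int)) (k : Nat)
    (hk : k < s.toList.length) :
    goBody s c st (k : Int) =
      (pvStep st.1 s.toList c.toList k, st.2.set k (some (pvStep st.1 s.toList c.toList k))) := by
  rw [goBody, pvStep]
  simp [List.getElem?_eq_getElem hk]

theorem forwardA (s c : String) (N : Nat) (hs : N ≤ s.toList.length) (m : Nat) (hm : m ≤ N) :
    (PySem.List.pyRange 0 (m : Int) 1).foldl (goBody s c)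
      (pvINF, List.replicate N (none : Option Int))
    = ((if m = 0 then pvINF else pvF s.toList c.toList (m - 1)),
       (List.range N).map (fun k => if k < m then some (pvF s.toList c.toList k) else none)) := by
  induction m with
  | zero =>
    rw [PySem.List.pyRange_one_eq_nil (by norm_num)]
    simp only [List.foldl_nil]
    congr 1
    apply List.ext_getElem
    · simp
    · intro i h1 h2
      simp at h1 ⊢
  | succ m ih =>
    have ih := ih (by omega)
    have hsplit : PySem.List.pyRange 0 ((m+1 : Nat) : Int) 1
        = PySem.List.pyRange 0 (m : Nat) 1 ++ [(m : Int)] := by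
      have : ((m+1 : Nat) : Int) = (m : Int) + 1 := by push_cast; ring
      rw [this, PySem.List.pyRange_one_succ_right (by omega)]
    rw [hsplit, List.foldl_append, List.foldl_cons, List.foldl_nil, ih,
      goBody_eq s c _ m (by omega)]
    have hcur : pvStep (if m = 0 then pvINF else pvF s.toList c.toList (m - 1)) s.toList c.toList m
        = pvF s.toList c.toList m := by
      rcases Nat.eq_zero_or_pos m with h | h
      · subst h; rw [if_pos rfl, pvF]
      · rw [if_neg (by omega)]
        obtain ⟨m', rfl⟩ := Nat.exists_eq_add_of_lt h
        simp only [Nat.zero_add, Nat.add_sub_cancel]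
        rw [pvF]
    rw [hcur]
    simp only [Prod.mk.injEq]
    exact ⟨by simp, pv_set_range N m _ (by omega)⟩

theorem backwardA (s c : String) (N : Nat) (hs : N ≤ s.toList.length) (m : Nat) (hm : m ≤ N) :
    ((List.range m).map (fun (j : Nat) => (N : Int) - 1 - (j : Int))).foldl (goBody s c)
      (pvINF, List.replicate N (none : Option Int))
    = ((if m = 0 then pvINF else pvG s.toList c.toList N (m - 1)),
       (List.range N).map (fun k =>
         if N - m ≤ k then some (pvG s.toList c.toList N (N - 1 - k)) else none)) := by
  induction m with
  | zero =>
    rw [List.range_zero, List.map_nil, List.foldl_nil, if_pos rfl]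
    congr 1
    apply List.ext_getElem
    · simp
    · intro i h1 h2
      simp only [List.getElem_replicate, List.getElem_map, List.getElem_range]
      rw [if_neg (by simp at h1; omega)]
  | succ m ih =>
    have ih := ih (by omega)
    have hidx : ((N : Int) - 1 - (m : Int)) = ((N - 1 - m : Nat) : Int) := by omega
    rw [List.range_succ, List.map_append, List.foldl_append, ih]
    simp only [List.map_cons, List.map_nil, List.foldl_cons, List.foldl_nil]
    rw [hidx, goBody_eq s c _ (N - 1 - m) (by omega)]
    have hcur : pvStep (if m = 0 then pvINF else pvG s.toList c.toList N (m - 1))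
        s.toList c.toList (N - 1 - m) = pvG s.toList c.toList N m := by
      rcases Nat.eq_zero_or_pos m with h | h
      · subst h; rw [if_pos rfl, pvG]; norm_num
      · rw [if_neg (by omega)]
        obtain ⟨m', rfl⟩ := Nat.exists_eq_add_of_lt h
        simp only [Nat.zero_add, Nat.add_sub_cancel]
        rw [pvG]
    rw [hcur]
    simp only [Prod.mk.injEq]
    refine ⟨by simp, ?_⟩
    have heq : pvG s.toList c.toList N m = pvG s.toList c.toList N (N - 1 - (N - 1 - m)) := by
      congr 1
      omega
    calc ((List.range N).map (fun k =>
            if N - m ≤ k then some (pvG s.toList c.toList N (N - 1 - k)) else none)).set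
          (N - 1 - m) (some (pvG s.toList c.toList N m))
        = ((List.range N).map (fun k =>
            if N - m ≤ k then some (pvG s.toList c.toList N (N - 1 - k)) else none)).set
          (N - 1 - m) (some (pvG s.toList c.toList N (N - 1 - (N - 1 - m)))) := by rw [← heq]
      _ = (List.range N).map (fun k =>
            if N - (m + 1) ≤ k then some (pvG s.toList c.toList N (N - 1 - k)) else none) :=
          pv_set_range' N m _ (by omega)

theorem pointwise (t cl : List Char) (N : Nat) (hN : N ≤ t.length) (k : Nat) (hk : k < N) :
    (if min (pvF t cl k) (pvG t cl N (N - 1 - k)) < pvINF then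
        min (pvF t cl k) (pvG t cl N (N - 1 - k)) else -1)
    = (if min (walkL t cl (k : Int) 0) (walkR (N : Int) t cl (k : Int) 0) < pvINF then
        min (walkL t cl (k : Int) 0) (walkR (N : Int) t cl (k : Int) 0) else -1) := by
  have hkt : k < t.length := by omega
  have hL := walkL_spec t cl k hkt
  have hR := walkR_spec t cl N hN (N - 1 - k) (by omega)
  have hkk : N - 1 - (N - 1 - k) = k := by omega
  rw [hkk] at hR
  by_cases hrl : pvRchF t cl k <;> by_cases hrr : pvRchR t cl N (N - 1 - k) <;>
    [rw [if_pos hrl] at hL; rw [if_pos hrl] at hL; rw [if_neg hrl] at hL;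
      rw [if_neg hrl] at hL] <;>
    [rw [if_pos hrr] at hR; rw [if_neg hrr] at hR; rw [if_pos hrr] at hR;
      rw [if_neg hrr] at hR] <;>
    obtain ⟨hL1, hL2⟩ := hL <;> obtain ⟨hR1, hR2⟩ := hR <;>
    rw [hL2 0, hR2 0] <;> rw [min_def, min_def] <;> split_ifs <;> omega

-- ===== VERDICT (by name: the statement is the Claim_ definition above) =====
theorem get_answer_array_A_form (n : Int) (s c : String) (hpre : Pre_get_answer_array n s c)
    (hn : 0 < n) :
    get_answer_array n s c
    = (List.range n.toNat).map (fun k =>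
        if min (pvF s.toList c.toList k) (pvG s.toList c.toList n.toNat (n.toNat - 1 - k)) < pvINF
        then min (pvF s.toList c.toList k) (pvG s.toList c.toList n.toNat (n.toNat - 1 - k))
        else -1) := by
  have hcast : n = ((n.toNat : Nat) : Int) := by omega
  have hlen : n.toNat ≤ s.toList.length := by
    unfold Pre_get_answer_array at hpre
    omega
  set N := n.toNat with hNdef
  have hfwd := forwardA s c N hlen N le_rfl
  have hbwd := backwardA s c N hlen N le_rfl
  have hb : PySem.List.pyRange (n - 1) (-1) (-1)
      = (List.range N).map (fun (j : Nat) => (N : Int) - 1 - (j : Int)) := by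
    rw [PySem.List.pyRange_neg_one]
    have h1 : (n - 1 - -1).toNat = N := by omega
    rw [h1]
    simp only [hcast]
  rw [get_answer_array, go_one_direction, go_one_direction, hb]
  rw [show PySem.List.pyRange 0 n 1 = PySem.List.pyRange 0 ((N : Nat) : Int) 1 by rw [← hcast]]
  rw [hfwd, hbwd]
  have hNne : ¬ (N = 0) := by omega
  rw [if_neg hNne, if_neg hNne]
  have hsimpF : (List.range N).map (fun k => if k < N then some (pvF s.toList c.toList k) else none)
      = (List.range N).map (fun k => some (pvF s.toList c.toList k)) :=
    List.map_congr_left (fun k hk => if_pos (List.mem_range.mp hk))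
  have hsimpG : (List.range N).map
        (fun k => if N - N ≤ k then some (pvG s.toList c.toList N (N - 1 - k)) else none)
      = (List.range N).map (fun k => some (pvG s.toList c.toList N (N - 1 - k))) :=
    List.map_congr_left (fun k _ => if_pos (by omega))
  rw [hsimpF, hsimpG, List.zip_map', List.map_map]
  rfl

theorem get_answer_array_alt_form (n : Int) (s c : String) (hn : 0 < n) :
    get_answer_array_alt n s c
    = (List.range n.toNat).map (fun (k : Nat) =>
        if min (walkL s.toList c.toList (k : Int) 0) (walkR n s.toList c.toList (k : Int) 0) < pvINF
        then min (walkL s.toList c.toList (k : Int) 0) (walkR n s.toList c.toList (k : Int) 0)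
        else -1) := by
  rw [get_answer_array_alt]
  rw [PySem.List.foldl_append_singleton_eq_map
    (f := fun i => if min (walkL s.toList c.toList i 0) (walkR n s.toList c.toList i 0) < pvINF
        then min (walkL s.toList c.toList i 0) (walkR n s.toList c.toList i 0) else -1)]
  rw [List.nil_append, PySem.List.pyRange_one, List.map_map]
  simp only [Int.sub_zero]
  apply List.map_congr_left
  intro k _
  simp only [Function.comp, zero_add]

-- ===== VERDICT (by name: the statement is the Claim_ definition above) =====
theorem get_answer_array_spec : Claim_equal_get_answer_array := by
  intro n s c _hdom hpre
  unfold Spec_get_answer_array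
  rcases (by omega : n ≤ 0 ∨ 0 < n) with hn | hn
  · have h1 : PySem.List.pyRange 0 n 1 = [] := PySem.List.pyRange_one_eq_nil hn
    have h2 : PySem.List.pyRange (n - 1) (-1) (-1) = [] :=
      PySem.List.pyRange_neg_one_eq_nil (by omega)
    have h3 : n.toNat = 0 := by omega
    rw [get_answer_array, get_answer_array_alt, go_one_direction, go_one_direction, h1, h2, h3]
    simp
  · have hlen : n.toNat ≤ s.toList.length := by
      unfold Pre_get_answer_array at hpre; omega
    have hcast : n = ((n.toNat : Nat) : Int) := by omega
    rw [get_answer_array_A_form n s c hpre hn, get_answer_array_alt_form n s c hn]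
    apply List.map_congr_left
    intro k hk
    have hkN : k < n.toNat := List.mem_range.mp hk
    have := pointwise s.toList c.toList n.toNat hlen k hkN
    rw [this, ← hcast]
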